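-- pv_equiv track=rewrite | github.com/ZOROBRUV/adityasahay_spider_task1 | common/blockchaintask1/sss_version.py | get_polynomial_value
-- ===== SOURCE A (Python) =====
-- PRIME = 208351617316091241234326746312124448251235562226470491514186331217050270460481
--
-- def get_polynomial_value(coefficients, x):
--     result = 0
--     power = 0
--     for coef in coefficients:
--         result += (coef * pow(x, power, PRIME)) % PRIME
--         result %= PRIME
--         power += 1
--     return result
-- ===== SOURCE B (Python) =====
-- PRIME = 208351617316091241234326746312124448251235562226470491514186331217050270460481
--
-- def get_polynomial_value(coefficients, x):
--     result = 0
--     for coef in reversed(coefficients):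
--         result = (result * x + coef) % PRIME
--     return result
-- ===== Notes on version B (the rewrite author's own statement) =====
-- stated objective: faster
-- what changed: Replaces the per-term modular exponentiation pow(x, power, PRIME) with a single Horner-scheme pass over the reversed coefficient list, one multiply-add-mod per coefficient.
import Mathlib
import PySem

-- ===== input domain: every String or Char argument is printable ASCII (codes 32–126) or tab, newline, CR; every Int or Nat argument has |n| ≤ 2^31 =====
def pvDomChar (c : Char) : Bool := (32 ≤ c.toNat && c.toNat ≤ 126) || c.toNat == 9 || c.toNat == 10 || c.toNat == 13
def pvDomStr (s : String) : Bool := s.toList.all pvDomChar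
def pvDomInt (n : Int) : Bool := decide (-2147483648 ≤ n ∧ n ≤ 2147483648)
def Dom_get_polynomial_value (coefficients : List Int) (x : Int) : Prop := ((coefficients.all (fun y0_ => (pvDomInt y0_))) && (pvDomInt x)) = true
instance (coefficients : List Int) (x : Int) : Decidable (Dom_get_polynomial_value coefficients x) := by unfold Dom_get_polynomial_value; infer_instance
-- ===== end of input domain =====

-- B evaluates the polynomial with one Horner-scheme pass (one multiply-add-mod per
-- coefficient) instead of recomputing a modular power for every term.


def PRIME : Int := 208351617316091241234326746312124448251235562226470491514186331217050270460481

-- ===== PORT A =====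
-- state = (result, power); pow(x, power, PRIME) is PySem.Int.powMod (exact for this positive modulus)
def get_polynomial_value (coefficients : List Int) (x : Int) : Int :=
  (coefficients.foldl
    (fun (s : Int × Nat) coef =>
      (PySem.Int.mod (s.1 + PySem.Int.mod (coef * PySem.Int.powMod x s.2 PRIME) PRIME) PRIME,
       s.2 + 1))
    (0, 0)).1

-- ===== PORT B =====
def get_polynomial_value_alt (coefficients : List Int) (x : Int) : Int :=
  coefficients.reverse.foldl (fun r coef => PySem.Int.mod (r * x + coef) PRIME) 0

-- ===== PRECONDITION & SPEC =====
def Spec_get_polynomial_value (coefficients : List Int) (x : Int) (out : Int) : Prop := out = get_polynomial_value_alt coefficients x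
instance (coefficients : List Int) (x : Int) (out : Int) : Decidable (Spec_get_polynomial_value coefficients x out) := by unfold Spec_get_polynomial_value; infer_instance

-- ===== CLAIM (what is proved, stated in full; the proofs are below) =====
def Claim_equal_get_polynomial_value : Prop := ∀ (coefficients : List Int) (x : Int), Dom_get_polynomial_value coefficients x → Spec_get_polynomial_value coefficients x (get_polynomial_value coefficients x)

-- ===== LEMMAS AND PROOFS =====

theorem prime_pos : (0 : Int) < PRIME := by unfold PRIME; norm_num

-- exact Horner-form value of the polynomial (unreduced)
def horner (coefficients : List Int) (x : Int) : Int :=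
  coefficients.foldr (fun c acc => c + x * acc) 0

theorem altAux_eq (cs : List Int) (x : Int) :
    cs.foldr (fun c r => (r * x + c) % PRIME) 0 = horner cs x % PRIME := by
  induction cs with
  | nil => simp [horner]
  | cons c tl ih =>
      simp only [List.foldr, horner, ih]
      conv_rhs => rw [Int.add_emod, Int.mul_emod]
      conv_lhs => rw [Int.add_emod, Int.mul_emod, Int.emod_emod_of_dvd _ dvd_rfl]
      rw [Int.add_comm, Int.mul_comm]

theorem aAux_eq (cs : List Int) (x : Int) (r : Int) (p : Nat) :
    (cs.foldl
      (fun (s : Int × Nat) coef =>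
        ((s.1 + (coef * (x ^ s.2 % PRIME)) % PRIME) % PRIME, s.2 + 1))
      (r % PRIME, p)).1 = (r + x ^ p * horner cs x) % PRIME := by
  induction cs generalizing r p with
  | nil => simp [horner]
  | cons c tl ih =>
      simp only [List.foldl, horner, List.foldr]
      have hstate : (r % PRIME + (c * (x ^ p % PRIME)) % PRIME) % PRIME
          = (r + c * x ^ p) % PRIME := by
        conv_rhs => rw [Int.add_emod, Int.mul_emod]
        conv_lhs => rw [Int.add_emod, Int.emod_emod_of_dvd _ dvd_rfl,
                        Int.mul_emod, Int.emod_emod_of_dvd _ dvd_rfl]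
        simp [Int.emod_emod_of_dvd]
      rw [hstate, ih (r + c * x ^ p) (p + 1)]
      congr 1
      simp only [horner]
      ring

-- ===== VERDICT (by name: the statement is the Claim_ definition above) =====
theorem get_polynomial_value_spec : Claim_equal_get_polynomial_value := by
  intro cs x _
  unfold Spec_get_polynomial_value get_polynomial_value get_polynomial_value_alt
  simp only [PySem.Int.powMod, PySem.Int.mod_eq_emod_of_pos prime_pos, List.foldl_reverse]
  have h0 : (0 : Int) = 0 % PRIME := (Int.zero_emod PRIME).symm
  rw [show ((0 : Int), (0 : Nat)) = ((0 : Int) % PRIME, (0 : Nat)) from by rw [← h0]]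
  rw [aAux_eq cs x 0 0, altAux_eq cs x]
  simp
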